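-- pv_equiv track=rewrite | github.com/MatveyMosyagin/ege | 17063430/number23.py | f
-- ===== SOURCE A (Python) =====
-- def f(a, m):
--     if a <= 17:
--         return m % 2 == 0
--     if m == 0:
--         return 0
--     h = [f(a - 1, m - 1)]
--     if a % 3 == 0:
--         h.append(f(a // 3, m - 1))
--     else:
--         h.append(f(a - 2, m - 1))
--     if a % 5 == 0:
--         h.append(f(a // 5, m - 1))
--     else:
--         h.append(f(a - 3, m - 1))
--     if (m - 1) % 2 == 0:
--         return any(h)
--     else:
--         return all(h)
-- ===== SOURCE B (Python) =====
-- def f(a, m):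
--     # Negamax reformulation: lose(a, m) is a single uniform NOR recursion, memoized;
--     # f(a, m) == lose(a, m) XOR (m is odd).
--     memo = {}
--
--     def lose(a, m):
--         if a <= 17:
--             return True
--         if m == 0:
--             return False
--         r = memo.get((a, m))
--         if r is None:
--             c2 = a // 3 if a % 3 == 0 else a - 2
--             c3 = a // 5 if a % 5 == 0 else a - 3
--             x = lose(a - 1, m - 1)
--             y = lose(c2, m - 1)
--             z = lose(c3, m - 1)
--             r = not (x or y or z)
--             memo[(a, m)] = r
--         return r
--
--     return lose(a, m) != (m % 2 == 1)
-- ===== Notes on version B (the rewrite author's own statement) =====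
-- stated objective: faster
-- what changed: B replaces A's parity-alternating any/all recursion by a uniform negamax: a single memoized NOR recursion lose(a,m) with base value True, from which f is read off as lose(a,m) XOR (m odd); the memo makes each (a,m) state computed once instead of A's exponential call tree. Pre_ excludes a > 17 with m == 0, where A returns the int 0 instead of a bool (B returns False there), and the deep inputs on which both raise RecursionError.
-- outside the precondition, e.g. on f(9142, 0): A returns 0, B returns False
import Mathlib
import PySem

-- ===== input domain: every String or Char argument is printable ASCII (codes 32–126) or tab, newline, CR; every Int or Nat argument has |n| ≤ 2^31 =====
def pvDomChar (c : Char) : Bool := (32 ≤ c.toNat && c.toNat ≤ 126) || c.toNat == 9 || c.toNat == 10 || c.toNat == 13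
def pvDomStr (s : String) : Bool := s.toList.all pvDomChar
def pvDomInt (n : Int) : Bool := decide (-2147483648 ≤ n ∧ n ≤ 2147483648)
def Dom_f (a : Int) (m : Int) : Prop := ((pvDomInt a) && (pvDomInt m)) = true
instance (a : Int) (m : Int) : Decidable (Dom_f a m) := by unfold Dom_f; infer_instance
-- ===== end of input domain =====

-- B replaces the parity-alternating any/all recursion by a single memoized NOR recursion
-- ("negamax") lose(a,m), and reads f off as lose(a,m) XOR (m odd).

-- termination helper (cited by the ports' decreasing_by)
theorem pv_fdiv_lt (a k : Int) (ha : 17 < a) (hk : 1 < k) :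
    (PySem.Int.floordiv a k).toNat < a.toNat := by
  rw [PySem.Int.floordiv_eq_ediv_of_pos (by omega)]
  have hq : 0 ≤ a / k := Int.ediv_nonneg (by omega) (by omega)
  have he : k * (a / k) + a % k = a := Int.mul_ediv_add_emod a k
  have hr : 0 ≤ a % k := Int.emod_nonneg a (by omega)
  have h2 : 2 * (a / k) ≤ k * (a / k) := mul_le_mul_of_nonneg_right (by omega) hq
  omega

-- ===== PORT A =====
def f (a : Int) (m : Int) : Bool :=
  if a ≤ 17 then PySem.Int.mod m 2 == 0
  else if m == 0 then false  -- Python returns the falsy int 0 here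
  else
    let h1 := f (a - 1) (m - 1)
    let h2 := if PySem.Int.mod a 3 == 0 then f (PySem.Int.floordiv a 3) (m - 1)
              else f (a - 2) (m - 1)
    let h3 := if PySem.Int.mod a 5 == 0 then f (PySem.Int.floordiv a 5) (m - 1)
              else f (a - 3) (m - 1)
    if PySem.Int.mod (m - 1) 2 == 0 then h1 || h2 || h3 else h1 && h2 && h3
termination_by a.toNat
decreasing_by
  · omega
  · exact pv_fdiv_lt a 3 (by omega) (by omega)
  · omega
  · exact pv_fdiv_lt a 5 (by omega) (by omega)
  · omega

-- ===== PORT B =====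
-- the inner 'lose' of Source B, with the memo dictionary threaded explicitly
def loseGo (memo : PySem.Dict (Int × Int) Bool) (a : Int) (m : Int) :
    Bool × PySem.Dict (Int × Int) Bool :=
  if a ≤ 17 then (true, memo)
  else if m == 0 then (false, memo)
  else
    match memo.get? (a, m) with
    | some r => (r, memo)
    | none =>
      let c2 := if PySem.Int.mod a 3 == 0 then PySem.Int.floordiv a 3 else a - 2
      let c3 := if PySem.Int.mod a 5 == 0 then PySem.Int.floordiv a 5 else a - 3
      let p1 := loseGo memo (a - 1) (m - 1)
      let p2 := loseGo p1.2 c2 (m - 1)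
      let p3 := loseGo p2.2 c3 (m - 1)
      let r := !(p1.1 || p2.1 || p3.1)
      (r, p3.2.insert (a, m) r)
termination_by a.toNat
decreasing_by
  · omega
  · split
    · exact pv_fdiv_lt a 3 (by omega) (by omega)
    · omega
  · split
    · exact pv_fdiv_lt a 5 (by omega) (by omega)
    · omega

def f_alt (a : Int) (m : Int) : Bool :=
  (loseGo PySem.Dict.empty a m).1 != (PySem.Int.mod m 2 == 1)

-- ===== PRECONDITION & SPEC =====
-- Pre_ excludes (i) the inputs with a > 17 and m = 0, on which A returns the int 0 (not a bool,
-- the declared return type; B returns False there), and (ii) the inputs whose a-1 call chain is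
-- ≥ 8000 frames deep, on which both Pythons raise RecursionError.
def Pre_f (a : Int) (m : Int) : Prop :=
  a ≤ 17 ∨ (0 < m ∧ (m < 8000 ∨ a < 8017)) ∨ (m < 0 ∧ a < 8017)
instance (a : Int) (m : Int) : Decidable (Pre_f a m) := by unfold Pre_f; infer_instance
def pvWitness_f : Int × Int := (20, 3)
def Spec_f (a : Int) (m : Int) (out : Bool) : Prop := out = f_alt a m
instance (a : Int) (m : Int) (out : Bool) : Decidable (Spec_f a m out) := by unfold Spec_f; infer_instance

-- ===== CLAIM (what is proved, stated in full; the proofs are below) =====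
def Claim_equal_f : Prop := ∀ (a : Int) (m : Int), Dom_f a m → Pre_f a m → Spec_f a m (f a m)

-- ===== LEMMAS AND PROOFS =====

theorem parity_compl (m : Int) :
    (PySem.Int.mod m 2 == 0) = !(PySem.Int.mod m 2 == 1) := by
  rw [PySem.Int.mod_eq_emod_of_pos (by omega)]
  rcases Int.emod_two_eq m with h | h <;> rw [h] <;> decide

theorem parity_succ (m : Int) :
    (PySem.Int.mod m 2 == 1) = (PySem.Int.mod (m - 1) 2 == 0) := by
  rw [PySem.Int.mod_eq_emod_of_pos (by omega), PySem.Int.mod_eq_emod_of_pos (by omega)]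
  rcases Int.emod_two_eq m with h | h
  · have h' : (m - 1) % 2 = 1 := by omega
    rw [h, h']; decide
  · have h' : (m - 1) % 2 = 0 := by omega
    rw [h, h']; decide

-- every value stored in the memo, XOR (its m odd), is the corresponding value of A
def MemoOK (memo : PySem.Dict (Int × Int) Bool) : Prop :=
  ∀ k v, memo.get? k = some v → (v != (PySem.Int.mod k.2 2 == 1)) = f k.1 k.2

theorem memoOK_insert {memo : PySem.Dict (Int × Int) Bool} (h : MemoOK memo)
    {a m : Int} {r : Bool} (hr : (r != (PySem.Int.mod m 2 == 1)) = f a m) :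
    MemoOK (memo.insert (a, m) r) := by
  intro k v hk
  rw [PySem.Dict.get?_insert] at hk
  split at hk
  · rename_i hke; cases hk; subst hke; exact hr
  · exact h k v hk

theorem memoOK_empty : MemoOK PySem.Dict.empty := by
  intro k v hk
  simp [PySem.Dict.get?_empty] at hk

theorem nor_xor (q l1 l2 l3 : Bool) :
    ((!(l1 || l2 || l3)) != !q)
      = (if (!q) = true then (l1 != q) || (l2 != q) || (l3 != q)
         else (l1 != q) && (l2 != q) && (l3 != q)) := by
  cases q <;> cases l1 <;> cases l2 <;> cases l3 <;> rfl

theorem loseGo_correct : ∀ (n : Nat) (a m : Int), a.toNat ≤ n →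
    ∀ memo, MemoOK memo →
      ((loseGo memo a m).1 != (PySem.Int.mod m 2 == 1)) = f a m
        ∧ MemoOK (loseGo memo a m).2 := by
  intro n
  induction n with
  | zero =>
    intro a m ha memo hmemo
    have h17 : a ≤ 17 := by omega
    rw [loseGo, f]
    simp only [if_pos h17]
    refine ⟨?_, hmemo⟩
    rw [parity_compl m]
    cases (PySem.Int.mod m 2 == 1) <;> rfl
  | succ n ih =>
    intro a m ha memo hmemo
    by_cases h17 : a ≤ 17
    · rw [loseGo, f]
      simp only [if_pos h17]
      refine ⟨?_, hmemo⟩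
      rw [parity_compl m]
      cases (PySem.Int.mod m 2 == 1) <;> rfl
    · by_cases hm : (m == 0) = true
      · have hm' : m = 0 := by simpa using hm
        subst hm'
        rw [loseGo, f]
        simp only [if_neg h17, if_pos (by decide : ((0:Int) == 0) = true)]
        exact ⟨by decide, hmemo⟩
      · rw [loseGo]
        simp only [if_neg h17, if_neg hm]
        cases hg : memo.get? (a, m) with
        | some v => exact ⟨hmemo (a, m) v hg, hmemo⟩
        | none =>
          obtain ⟨e1, k1⟩ := ih (a - 1) (m - 1) (by omega) memo hmemo
          by_cases c3 : (PySem.Int.mod a 3 == 0) = true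
          · simp only [if_pos c3]
            obtain ⟨e2, k2⟩ := ih (PySem.Int.floordiv a 3) (m - 1)
              (by have := pv_fdiv_lt a 3 (by omega) (by omega); omega) _ k1
            by_cases c5 : (PySem.Int.mod a 5 == 0) = true
            · simp only [if_pos c5]
              obtain ⟨e3, k3⟩ := ih (PySem.Int.floordiv a 5) (m - 1)
                (by have := pv_fdiv_lt a 5 (by omega) (by omega); omega) _ k2
              have hv : ((!((loseGo memo (a - 1) (m - 1)).1
                    || (loseGo (loseGo memo (a - 1) (m - 1)).2 (PySem.Int.floordiv a 3) (m - 1)).1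
                    || (loseGo (loseGo (loseGo memo (a - 1) (m - 1)).2 (PySem.Int.floordiv a 3) (m - 1)).2
                          (PySem.Int.floordiv a 5) (m - 1)).1))
                  != (PySem.Int.mod m 2 == 1)) = f a m := by
                conv_rhs => rw [f]
                simp only [if_neg h17, if_neg hm, if_pos c3, if_pos c5]
                rw [← e1, ← e2, ← e3, parity_succ m, parity_compl (m - 1)]
                exact nor_xor _ _ _ _
              exact ⟨hv, memoOK_insert k3 hv⟩
            · simp only [if_neg c5]
              obtain ⟨e3, k3⟩ := ih (a - 3) (m - 1) (by omega) _ k2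
              have hv : ((!((loseGo memo (a - 1) (m - 1)).1
                    || (loseGo (loseGo memo (a - 1) (m - 1)).2 (PySem.Int.floordiv a 3) (m - 1)).1
                    || (loseGo (loseGo (loseGo memo (a - 1) (m - 1)).2 (PySem.Int.floordiv a 3) (m - 1)).2
                          (a - 3) (m - 1)).1))
                  != (PySem.Int.mod m 2 == 1)) = f a m := by
                conv_rhs => rw [f]
                simp only [if_neg h17, if_neg hm, if_pos c3, if_neg c5]
                rw [← e1, ← e2, ← e3, parity_succ m, parity_compl (m - 1)]
                exact nor_xor _ _ _ _
              exact ⟨hv, memoOK_insert k3 hv⟩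
          · simp only [if_neg c3]
            obtain ⟨e2, k2⟩ := ih (a - 2) (m - 1) (by omega) _ k1
            by_cases c5 : (PySem.Int.mod a 5 == 0) = true
            · simp only [if_pos c5]
              obtain ⟨e3, k3⟩ := ih (PySem.Int.floordiv a 5) (m - 1)
                (by have := pv_fdiv_lt a 5 (by omega) (by omega); omega) _ k2
              have hv : ((!((loseGo memo (a - 1) (m - 1)).1
                    || (loseGo (loseGo memo (a - 1) (m - 1)).2 (a - 2) (m - 1)).1
                    || (loseGo (loseGo (loseGo memo (a - 1) (m - 1)).2 (a - 2) (m - 1)).2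
                          (PySem.Int.floordiv a 5) (m - 1)).1))
                  != (PySem.Int.mod m 2 == 1)) = f a m := by
                conv_rhs => rw [f]
                simp only [if_neg h17, if_neg hm, if_neg c3, if_pos c5]
                rw [← e1, ← e2, ← e3, parity_succ m, parity_compl (m - 1)]
                exact nor_xor _ _ _ _
              exact ⟨hv, memoOK_insert k3 hv⟩
            · simp only [if_neg c5]
              obtain ⟨e3, k3⟩ := ih (a - 3) (m - 1) (by omega) _ k2
              have hv : ((!((loseGo memo (a - 1) (m - 1)).1
                    || (loseGo (loseGo memo (a - 1) (m - 1)).2 (a - 2) (m - 1)).1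
                    || (loseGo (loseGo (loseGo memo (a - 1) (m - 1)).2 (a - 2) (m - 1)).2
                          (a - 3) (m - 1)).1))
                  != (PySem.Int.mod m 2 == 1)) = f a m := by
                conv_rhs => rw [f]
                simp only [if_neg h17, if_neg hm, if_neg c3, if_neg c5]
                rw [← e1, ← e2, ← e3, parity_succ m, parity_compl (m - 1)]
                exact nor_xor _ _ _ _
              exact ⟨hv, memoOK_insert k3 hv⟩

-- ===== VERDICT (by name: the statement is the Claim_ definition above) =====
theorem f_spec : Claim_equal_f := by
  intro a m _ _
  unfold Spec_f f_alt
  exact ((loseGo_correct a.toNat a m le_rfl PySem.Dict.empty memoOK_empty).1).symm
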